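-- pv_equiv track=rewrite | github.com/Bhagyashali3010/DSA | gift.py | count_valid_quadruples
-- ===== SOURCE A (Python) =====
-- from collections import defaultdict
--
-- def count_valid_quadruples(x):
--     n = len(x)
--     count = 0
--
--     # map to keep count of (char_a, char_b) pairs before position c
--     pair_count = defaultdict(int)
--     #
-- #wverealjagsegi
--     for c in range(1, n):
--         for d in range(c + 1, n):
--             # x[a] == x[c] and x[b] == x[d]
--             char_c = x[c]
--             char_d = x[d]
--             count += pair_count[(char_c, char_d)]
--
--         # Update pair_count with all (a, b) pairs where b == c
--         for a in range(c):
--             pair_count[(x[a], x[c])] += 1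
--
--     return count
-- ===== SOURCE B (Python) =====
-- def count_valid_quadruples(x):
--     n = len(x)
--     total = 0
--     prefix = {}   # counts of characters at indices < b
--     rem = {}      # counts of characters at indices > b (maintained)
--     for ch in x:
--         rem[ch] = rem.get(ch, 0) + 1
--     for b in range(n):
--         cb = x[b]
--         rem[cb] -= 1
--         right = rem[cb]            # = number of d > b with x[d] == cb
--         for c in range(b + 1, n):
--             if x[c] == cb:
--                 right -= 1         # now right = number of d > c with x[d] == cb
--             total += prefix.get(x[c], 0) * right
--         prefix[cb] = prefix.get(cb, 0) + 1
--     return total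
-- ===== Notes on version B (the rewrite author's own statement) =====
-- stated objective: faster
-- what changed: Instead of A's dict keyed by (char,char) pairs (built pair by pair and probed for every pair (c,d)), B fixes the middle pair (b,c) and multiplies a single-character prefix count by a running suffix count of x[b] maintained while c sweeps right.
import Mathlib
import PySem

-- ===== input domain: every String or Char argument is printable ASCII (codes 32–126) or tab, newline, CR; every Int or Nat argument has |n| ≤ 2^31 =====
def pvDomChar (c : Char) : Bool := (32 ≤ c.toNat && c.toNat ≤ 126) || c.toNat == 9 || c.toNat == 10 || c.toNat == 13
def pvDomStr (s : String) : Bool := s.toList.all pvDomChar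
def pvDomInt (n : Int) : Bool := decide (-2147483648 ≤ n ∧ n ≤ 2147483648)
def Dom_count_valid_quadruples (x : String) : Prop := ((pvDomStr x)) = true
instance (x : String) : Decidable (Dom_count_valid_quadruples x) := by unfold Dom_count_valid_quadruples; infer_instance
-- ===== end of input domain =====

-- B reorganizes A's (char,char)-pair-dict count into a prefix-counter / running-suffix-count sweep
-- over middle pairs (b,c); objective: faster (constant factor), same return value.


-- ===== PORT A =====
-- literal transliteration of A; the defaultdict read 'pair_count[(char_c, char_d)]' is ported as
-- getD _ 0 (defaultdict's silent insertion of the default changes no value ever read)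
def count_valid_quadruples (x : String) : Int :=
  let l := x.toList
  let n : Int := PySem.List.len l
  let st := (PySem.List.pyRange 1 n 1).foldl
    (fun (st : Int × PySem.Dict (Char × Char) Int) c =>
      let char_c := PySem.List.pyGetD l c ' '
      let cnt := (PySem.List.pyRange (c + 1) n 1).foldl
        (fun acc d => acc + st.2.getD (char_c, PySem.List.pyGetD l d ' ') 0) st.1
      let pc := (PySem.List.pyRange 0 c 1).foldl
        (fun dd a => dd.modify (PySem.List.pyGetD l a ' ', char_c) 0 (· + 1)) st.2
      (cnt, pc))
    (0, PySem.Dict.empty)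
  st.1

-- ===== PORT B =====
-- transliteration of Source B: prefix counts of chars before b, rem counts of chars after b,
-- inner sweep keeps a running count 'right' of x[b] strictly right of c
def count_valid_quadruples_alt (x : String) : Int :=
  let l := x.toList
  let n : Int := PySem.List.len l
  let rem0 : PySem.Dict Char Int :=
    l.foldl (fun d ch => d.insert ch (d.getD ch 0 + 1)) PySem.Dict.empty
  let st := (PySem.List.pyRange 0 n 1).foldl
    (fun (st : Int × PySem.Dict Char Int × PySem.Dict Char Int) b =>
      let total := st.1
      let pfx := st.2.1
      let rem := st.2.2
      let cb := PySem.List.pyGetD l b ' '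
      let rem' := rem.insert cb (rem.getD cb 0 - 1)
      let tr := (PySem.List.pyRange (b + 1) n 1).foldl
        (fun (tr : Int × Int) c =>
          let xc := PySem.List.pyGetD l c ' '
          let right := if xc == cb then tr.2 - 1 else tr.2
          (tr.1 + pfx.getD xc 0 * right, right))
        (total, rem'.getD cb 0)
      (tr.1, pfx.insert cb (pfx.getD cb 0 + 1), rem'))
    (0, PySem.Dict.empty, rem0)
  st.1

-- ===== PRECONDITION & SPEC =====
def Spec_count_valid_quadruples (x : String) (out : Int) : Prop := out = count_valid_quadruples_alt x
instance (x : String) (out : Int) : Decidable (Spec_count_valid_quadruples x out) := by unfold Spec_count_valid_quadruples; infer_instance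

-- ===== CLAIM (what is proved, stated in full; the proofs are below) =====
def Claim_equal_count_valid_quadruples : Prop := ∀ (x : String), Dom_count_valid_quadruples x → Spec_count_valid_quadruples x (count_valid_quadruples x)

-- ===== LEMMAS AND PROOFS =====

-- abbreviations used by the proofs: positional char lookup, prefix/suffix counts,
-- A's pair-dict contents, and the partial totals of both loops
def pvGd (l : List Char) (i : Nat) : Char := l.getD i ' '
def pvTc (l : List Char) (b : Nat) (u : Char) : Int := ((l.take b).count u : Int)
def pvDc (l : List Char) (c : Nat) (v : Char) : Int := ((l.drop c).count v : Int)
def pvPcnt (l : List Char) (C : Nat) (u v : Char) : Int :=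
  ∑ b ∈ Finset.range C, if pvGd l b = v then pvTc l b u else 0
def pvA (l : List Char) (C : Nat) : Int :=
  ∑ c ∈ Finset.range C, ∑ d ∈ Finset.Ico (c + 1) l.length, pvPcnt l c (pvGd l c) (pvGd l d)
def pvB (l : List Char) (B : Nat) : Int :=
  ∑ b ∈ Finset.range B, ∑ c ∈ Finset.Ico (b + 1) l.length, pvTc l b (pvGd l c) * pvDc l (c + 1) (pvGd l b)

lemma pvSumLoop (l : List Char) (g : Char → Int) (a : Nat) :
    ∀ (m : Nat), a ≤ m → ∀ (init : Int),
    (PySem.List.pyRange (a : Int) (m : Int) 1).foldl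
      (fun acc i => acc + g (PySem.List.pyGetD l i ' ')) init
    = init + ∑ i ∈ Finset.Ico a m, g (pvGd l i) := by
  intro m
  induction m with
  | zero =>
    intro ha init
    have : a = 0 := by omega
    subst this
    simp [PySem.List.pyRange_one_eq_nil]
  | succ m ih =>
    intro ha init
    by_cases h : a ≤ m
    · rw [show ((m + 1 : Nat) : Int) = (m : Int) + 1 by push_cast; ring,
        PySem.List.pyRange_one_succ_right (by exact_mod_cast h), List.foldl_append]
      simp [ih h, Finset.sum_Ico_succ_top h, pvGd, add_assoc]
    · have ha' : a = m + 1 := by omega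
      subst ha'
      simp [PySem.List.pyRange_one_eq_nil]

lemma pvUpdLoop (l : List Char) (vc : Char) (D : PySem.Dict (Char × Char) Int) :
    ∀ (c : Nat), c ≤ l.length → ∀ (u v : Char),
    ((PySem.List.pyRange 0 (c : Int) 1).foldl
      (fun dd a => dd.modify (PySem.List.pyGetD l a ' ', vc) 0 (· + 1)) D).getD (u, v) 0
    = D.getD (u, v) 0 + if v = vc then pvTc l c u else 0 := by
  intro c
  induction c with
  | zero =>
    intro _ u v
    simp [PySem.List.pyRange_one_eq_nil, pvTc]
  | succ c ih =>
    intro hc u v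
    rw [show ((c + 1 : Nat) : Int) = (c : Int) + 1 by push_cast; ring,
      PySem.List.pyRange_one_succ_right (by positivity), List.foldl_append]
    simp only [List.foldl_cons, List.foldl_nil, PySem.List.pyGetD_natCast]
    rw [PySem.Dict.getD_modify]
    simp only [ih (by omega)]
    have hlt : c < l.length := by omega
    have htake : l.take (c + 1) = l.take c ++ [l[c]] := by
      rw [List.take_add_one]; simp [List.getElem?_eq_getElem hlt]
    have hgd : l.getD c ' ' = l[c] := List.getD_eq_getElem l ' ' hlt
    simp only [pvTc, htake, List.count_append, hgd]
    rcases eq_or_ne v vc with h1 | h1 <;> rcases eq_or_ne u (l[c]) with h2 | h2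
    · subst h1; subst h2
      simp
      ring
    · subst h1
      simp [Prod.ext_iff, h2, Ne.symm h2]
    · subst h2
      simp [Prod.ext_iff, h1]
    · simp [Prod.ext_iff, h1]

lemma pvAInv (l : List Char) : ∀ (C : Nat), C ≤ l.length →
    ∃ D : PySem.Dict (Char × Char) Int,
    (PySem.List.pyRange 1 (C : Int) 1).foldl
      (fun (st : Int × PySem.Dict (Char × Char) Int) c =>
        ((PySem.List.pyRange (c + 1) ((l.length : Int)) 1).foldl
          (fun acc d => acc + st.2.getD (PySem.List.pyGetD l c ' ', PySem.List.pyGetD l d ' ') 0) st.1,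
         (PySem.List.pyRange 0 c 1).foldl
          (fun dd a => dd.modify (PySem.List.pyGetD l a ' ', PySem.List.pyGetD l c ' ') 0 (· + 1)) st.2))
      (0, PySem.Dict.empty)
    = (pvA l C, D) ∧ ∀ u v, D.getD (u, v) 0 = pvPcnt l C u v := by
  intro C
  induction C with
  | zero =>
    intro _
    exact ⟨PySem.Dict.empty, by simp [PySem.List.pyRange_one_eq_nil, pvA], by
      intro u v; simp [pvPcnt]⟩
  | succ C ih =>
    intro hC
    rcases Nat.eq_zero_or_pos C with h0 | hpos
    · subst h0
      refine ⟨PySem.Dict.empty, by simp [PySem.List.pyRange_one_eq_nil, pvA, pvPcnt, pvTc], ?_⟩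
      intro u v
      simp [pvPcnt, pvTc]
    · obtain ⟨D, hfold, hD⟩ := ih (by omega)
      have hpeel : PySem.List.pyRange 1 ((C + 1 : Nat) : Int) 1
          = PySem.List.pyRange 1 (C : Int) 1 ++ [(C : Int)] := by
        rw [show ((C + 1 : Nat) : Int) = (C : Int) + 1 by push_cast; ring]
        exact PySem.List.pyRange_one_succ_right (by exact_mod_cast hpos)
      refine ⟨(PySem.List.pyRange 0 (C : Int) 1).foldl
          (fun dd a => dd.modify (PySem.List.pyGetD l a ' ', PySem.List.pyGetD l (C : Int) ' ') 0 (· + 1)) D, ?_, ?_⟩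
      · rw [hpeel, List.foldl_append, hfold]
        simp only [List.foldl_cons, List.foldl_nil]
        congr 1
        rw [show ((C : Int) + 1) = ((C + 1 : Nat) : Int) by push_cast; ring,
          pvSumLoop l (fun ch => D.getD (PySem.List.pyGetD l (C : Int) ' ', ch) 0) (C + 1) l.length (by omega)]
        conv_rhs => rw [pvA, Finset.sum_range_succ]
        rw [pvA]
        congr 1
        apply Finset.sum_congr rfl
        intro d _
        rw [hD]
        simp [pvGd]
      · intro u v
        rw [pvUpdLoop l _ D C (by omega) u v, hD]
        conv_rhs => rw [pvPcnt, Finset.sum_range_succ]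
        rw [pvPcnt]
        congr 1
        simp only [PySem.List.pyGetD_natCast]
        rcases eq_or_ne v (pvGd l C) with h | h
        · simp [pvGd] at h ⊢
          simp [h]
        · simp [pvGd] at h ⊢
          rw [if_neg h, if_neg (fun hh => h hh.symm)]

lemma pvAeq (x : String) : count_valid_quadruples x = pvA x.toList x.toList.length := by
  unfold count_valid_quadruples
  simp only [PySem.List.len_eq]
  obtain ⟨D, hfold, -⟩ := pvAInv x.toList x.toList.length le_rfl
  rw [hfold]

lemma pvDcStep (l : List Char) (C : Nat) (hC : C < l.length) (v : Char) :
    pvDc l C v = pvDc l (C + 1) v + if l.getD C ' ' = v then 1 else 0 := by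
  have hdrop : l.drop C = l[C] :: l.drop (C + 1) := (List.getElem_cons_drop hC).symm
  have hgd : l.getD C ' ' = l[C] := List.getD_eq_getElem l ' ' hC
  rw [pvDc, pvDc, hdrop, List.count_cons, hgd]
  rcases eq_or_ne (l[C]) v with h | h <;> simp [h]

lemma pvTcStep (l : List Char) (B : Nat) (hB : B < l.length) (v : Char) :
    pvTc l (B + 1) v = pvTc l B v + if l.getD B ' ' = v then 1 else 0 := by
  have htake : l.take (B + 1) = l.take B ++ [l[B]] := by
    rw [List.take_add_one]; simp [List.getElem?_eq_getElem hB]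
  have hgd : l.getD B ' ' = l[B] := List.getD_eq_getElem l ' ' hB
  rw [pvTc, pvTc, htake, List.count_append, hgd]
  rcases eq_or_ne (l[B]) v with h | h <;> simp [h]

lemma pvBInner (l : List Char) (b : Nat) (pfx : PySem.Dict Char Int) :
    ∀ (C : Nat), b + 1 ≤ C → C ≤ l.length → ∀ (t : Int),
    (PySem.List.pyRange ((b : Int) + 1) (C : Int) 1).foldl
      (fun (tr : Int × Int) c =>
        (tr.1 + pfx.getD (PySem.List.pyGetD l c ' ') 0 *
           (if PySem.List.pyGetD l c ' ' == (l.getD b ' ') then tr.2 - 1 else tr.2),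
         if PySem.List.pyGetD l c ' ' == (l.getD b ' ') then tr.2 - 1 else tr.2))
      (t, pvDc l (b + 1) (l.getD b ' '))
    = (t + ∑ c ∈ Finset.Ico (b + 1) C, pfx.getD (pvGd l c) 0 * pvDc l (c + 1) (l.getD b ' '),
       pvDc l C (l.getD b ' ')) := by
  intro C
  induction C with
  | zero => intro h; omega
  | succ C ih =>
    intro h1 hC t
    by_cases h : b + 1 ≤ C
    · rw [show ((C + 1 : Nat) : Int) = (C : Int) + 1 by push_cast; ring,
        show ((b : Int) + 1) = ((b + 1 : Nat) : Int) by push_cast; ring,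
        PySem.List.pyRange_one_succ_right (by exact_mod_cast h), List.foldl_append]
      rw [show ((b + 1 : Nat) : Int) = (b : Int) + 1 by push_cast; ring, ih h (by omega) t]
      simp only [List.foldl_cons, List.foldl_nil, PySem.List.pyGetD_natCast]
      have hrt : (if l.getD C ' ' == (l.getD b ' ') then pvDc l C (l.getD b ' ') - 1 else pvDc l C (l.getD b ' '))
          = pvDc l (C + 1) (l.getD b ' ') := by
        rw [pvDcStep l C (by omega) (l.getD b ' ')]
        rcases eq_or_ne (l.getD C ' ') (l.getD b ' ') with hh | hh
        · rw [if_pos (beq_iff_eq.mpr hh), if_pos hh]; ring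
        · rw [if_neg (by simpa using hh), if_neg hh]; ring
      rw [hrt, Finset.sum_Ico_succ_top h]
      simp [pvGd, add_assoc]
    · have hb : C + 1 = b + 1 := by omega
      rw [hb]
      rw [show ((b + 1 : Nat) : Int) = (b : Int) + 1 by push_cast; ring]
      simp [PySem.List.pyRange_one_eq_nil]

lemma pvBInv (l : List Char) : ∀ (B : Nat), B ≤ l.length →
    ∃ (pfx rem : PySem.Dict Char Int),
    (PySem.List.pyRange 0 (B : Int) 1).foldl
      (fun (st : Int × PySem.Dict Char Int × PySem.Dict Char Int) b =>
        (((PySem.List.pyRange (b + 1) ((l.length : Int)) 1).foldl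
            (fun (tr : Int × Int) c =>
              (tr.1 + st.2.1.getD (PySem.List.pyGetD l c ' ') 0 *
                 (if PySem.List.pyGetD l c ' ' == PySem.List.pyGetD l b ' ' then tr.2 - 1 else tr.2),
               if PySem.List.pyGetD l c ' ' == PySem.List.pyGetD l b ' ' then tr.2 - 1 else tr.2))
            (st.1, (st.2.2.insert (PySem.List.pyGetD l b ' ')
                      (st.2.2.getD (PySem.List.pyGetD l b ' ') 0 - 1)).getD (PySem.List.pyGetD l b ' ') 0)).1,
         st.2.1.insert (PySem.List.pyGetD l b ' ') (st.2.1.getD (PySem.List.pyGetD l b ' ') 0 + 1),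
         st.2.2.insert (PySem.List.pyGetD l b ' ') (st.2.2.getD (PySem.List.pyGetD l b ' ') 0 - 1)))
      (0, PySem.Dict.empty, l.foldl (fun d ch => d.insert ch (d.getD ch 0 + 1)) PySem.Dict.empty)
    = (pvB l B, pfx, rem)
    ∧ (∀ v, pfx.getD v 0 = pvTc l B v) ∧ (∀ v, rem.getD v 0 = pvDc l B v) := by
  intro B
  induction B with
  | zero =>
    intro _
    refine ⟨PySem.Dict.empty, l.foldl (fun d ch => d.insert ch (d.getD ch 0 + 1)) PySem.Dict.empty,
      by simp [PySem.List.pyRange_one_eq_nil, pvB], fun v => by simp [pvTc], fun v => ?_⟩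
    rw [PySem.Dict.getD_foldl_insert_add_one]
    simp [pvDc]
  | succ B ih =>
    intro hB
    obtain ⟨pfx, rem, hfold, hpfx, hrem⟩ := ih (by omega)
    have hlt : B < l.length := by omega
    have hrem' : ∀ v, (rem.insert (l.getD B ' ') (rem.getD (l.getD B ' ') 0 - 1)).getD v 0
        = pvDc l (B + 1) v := by
      intro v
      rw [PySem.Dict.getD_insert]
      rcases eq_or_ne v (l.getD B ' ') with h | h
      · subst h
        rw [if_pos rfl, hrem, pvDcStep l B hlt (l.getD B ' ')]
        simp
      · rw [if_neg h, hrem, pvDcStep l B hlt v, if_neg (fun hh => h hh.symm)]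
        ring
    refine ⟨pfx.insert (l.getD B ' ') (pfx.getD (l.getD B ' ') 0 + 1),
            rem.insert (l.getD B ' ') (rem.getD (l.getD B ' ') 0 - 1), ?_, ?_, ?_⟩
    · rw [show ((B + 1 : Nat) : Int) = (B : Int) + 1 by push_cast; ring,
        PySem.List.pyRange_one_succ_right (by positivity), List.foldl_append, hfold]
      simp only [List.foldl_cons, List.foldl_nil, PySem.List.pyGetD_natCast]
      rw [hrem' (l.getD B ' ')]
      rw [pvBInner l B pfx l.length (by omega) le_rfl (pvB l B)]
      dsimp only
      congr 1
      conv_rhs => rw [pvB, Finset.sum_range_succ]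
      rw [pvB]
      congr 1
      apply Finset.sum_congr rfl
      intro c _
      rw [hpfx]
      simp [pvGd]
    · intro v
      rw [PySem.Dict.getD_insert]
      rcases eq_or_ne v (l.getD B ' ') with h | h
      · subst h
        rw [if_pos rfl, hpfx, pvTcStep l B hlt (l.getD B ' ')]
        simp
      · rw [if_neg h, hpfx, pvTcStep l B hlt v, if_neg (fun hh => h hh.symm)]
        ring
    · exact hrem'

lemma pvBeq (x : String) : count_valid_quadruples_alt x = pvB x.toList x.toList.length := by
  unfold count_valid_quadruples_alt
  simp only [PySem.List.len_eq]
  obtain ⟨pfx, rem, hfold, -, -⟩ := pvBInv x.toList x.toList.length le_rfl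
  rw [hfold]

lemma pvTcSum (l : List Char) : ∀ (m : Nat), m ≤ l.length → ∀ (u : Char),
    pvTc l m u = ∑ a ∈ Finset.range m, if pvGd l a = u then (1 : Int) else 0 := by
  intro m
  induction m with
  | zero => intro _ u; simp [pvTc]
  | succ m ih =>
    intro hm u
    have hlt : m < l.length := by omega
    have htake : l.take (m + 1) = l.take m ++ [l[m]] := by
      rw [List.take_add_one]; simp [List.getElem?_eq_getElem hlt]
    rw [Finset.sum_range_succ, ← ih (by omega) u, pvTc, pvTc, htake, List.count_append]
    have hgd : pvGd l m = l[m] := List.getD_eq_getElem l ' ' hlt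
    rcases eq_or_ne (l[m]) u with h | h <;> simp [hgd, h]

lemma pvDcSum (l : List Char) (m : Nat) (hm : m ≤ l.length) (v : Char) :
    pvDc l m v = ∑ d ∈ Finset.Ico m l.length, if pvGd l d = v then (1 : Int) else 0 := by
  have hsplit : pvTc l m v + pvDc l m v = pvTc l l.length v := by
    rw [pvTc, pvTc, pvDc]
    rw [show (List.count v (l.take m) : Int) + (List.count v (l.drop m) : Int)
        = ((List.count v (l.take m) + List.count v (l.drop m) : Nat) : Int) by push_cast; ring,
      ← List.count_append, List.take_append_drop, List.take_length]
  have h1 := pvTcSum l m hm v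
  have h2 := pvTcSum l l.length le_rfl v
  rw [Finset.sum_Ico_eq_sub _ hm]
  omega

lemma pvIteSum {α : Type} (P : Prop) [inst : Decidable P] (s : Finset α) (g : α → Int) :
    (if P then ∑ x ∈ s, g x else 0) = ∑ x ∈ s, if P then g x else 0 := by
  split_ifs <;> simp

lemma pvABeq (l : List Char) : pvA l l.length = pvB l l.length := by
  have hA : pvA l l.length = ∑ c ∈ Finset.range l.length, ∑ d ∈ Finset.range l.length,
      ∑ b ∈ Finset.range l.length,
      (if c < d then if b < c then if pvGd l b = pvGd l d then pvTc l b (pvGd l c) else 0 else 0 else 0 : Int) := by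
    rw [pvA]
    apply Finset.sum_congr rfl
    intro c hc
    have hcn : c < l.length := Finset.mem_range.mp hc
    rw [show Finset.Ico (c + 1) l.length = (Finset.range l.length).filter (fun d => c < d) by
        ext d; simp [Finset.mem_Ico, Finset.mem_filter]; omega,
      Finset.sum_filter]
    apply Finset.sum_congr rfl
    intro d _
    conv_lhs => rw [pvPcnt, show Finset.range c = (Finset.range l.length).filter (fun b => b < c) by
        ext b; simp [Finset.mem_filter]; omega,
      Finset.sum_filter]
    rw [pvIteSum]
  have hB : pvB l l.length = ∑ b ∈ Finset.range l.length, ∑ c ∈ Finset.range l.length,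
      ∑ d ∈ Finset.range l.length,
      (if c < d then if b < c then if pvGd l b = pvGd l d then pvTc l b (pvGd l c) else 0 else 0 else 0 : Int) := by
    rw [pvB]
    apply Finset.sum_congr rfl
    intro b _
    rw [show Finset.Ico (b + 1) l.length = (Finset.range l.length).filter (fun c => b < c) by
        ext c; simp [Finset.mem_Ico, Finset.mem_filter]; omega,
      Finset.sum_filter]
    apply Finset.sum_congr rfl
    intro c hc
    have hcn : c < l.length := Finset.mem_range.mp hc
    by_cases hbc : b < c
    · rw [if_pos hbc, pvDcSum l (c + 1) (by omega) (pvGd l b),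
        show Finset.Ico (c + 1) l.length = (Finset.range l.length).filter (fun d => c < d) by
          ext d; simp [Finset.mem_Ico, Finset.mem_filter]; omega,
        Finset.sum_filter, Finset.mul_sum]
      apply Finset.sum_congr rfl
      intro d _
      by_cases hcd : c < d
      · rcases eq_or_ne (pvGd l b) (pvGd l d) with h | h
        · simp [hcd, hbc, h]
        · simp [hcd, hbc, h, Ne.symm h]
      · simp [hcd]
    · rw [if_neg hbc]
      symm
      apply Finset.sum_eq_zero
      intro d _
      by_cases hcd : c < d <;> simp [hcd, hbc]
  rw [hA, hB]
  rw [show (∑ c ∈ Finset.range l.length, ∑ d ∈ Finset.range l.length, ∑ b ∈ Finset.range l.length,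
      (if c < d then if b < c then if pvGd l b = pvGd l d then pvTc l b (pvGd l c) else 0 else 0 else 0 : Int))
      = ∑ c ∈ Finset.range l.length, ∑ b ∈ Finset.range l.length, ∑ d ∈ Finset.range l.length,
      (if c < d then if b < c then if pvGd l b = pvGd l d then pvTc l b (pvGd l c) else 0 else 0 else 0 : Int)
    from Finset.sum_congr rfl (fun c _ => Finset.sum_comm)]
  exact Finset.sum_comm

-- ===== VERDICT (by name: the statement is the Claim_ definition above) =====
theorem count_valid_quadruples_spec : Claim_equal_count_valid_quadruples := by
  intro x _
  unfold Spec_count_valid_quadruples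
  rw [pvAeq, pvBeq, pvABeq]
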